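-- pv_equiv track=rewrite | github.com/Rivarrl/leetcode_python | leetcode/algorithm_utils.py | split_tree_list
-- ===== SOURCE A (Python) =====
-- def split_tree_list(arr):
--     depth = pow((len(arr) + 1), 2)
--     arrl, arrr = [], []
--     for i in range(1, depth):
--         l = 2 ** i
--         r = l * 2 - 1
--         m = (l + r) // 2
--         arrl += arr[l - 1 : m]
--         arrr += arr[m: r]
--     return arrl, arrr
-- ===== SOURCE B (Python) =====
-- def split_tree_list(arr):
--     # single linear pass over 1-based positions 2..len(arr), tracking the
--     # current level's boundaries l..r and midpoint m instead of slicing per level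
--     arrl, arrr = [], []
--     l, r, m = 2, 3, 2
--     for p in range(2, len(arr) + 1):
--         if p > r:
--             l *= 2
--             r = 2 * l - 1
--             m = (l + r) // 2
--         if p <= m:
--             arrl.append(arr[p - 1])
--         else:
--             arrr.append(arr[p - 1])
--     return arrl, arrr
-- ===== Notes on version B (the rewrite author's own statement) =====
-- stated objective: faster
-- what changed: A loops over (len+1)^2 candidate levels computing 2**i big-int powers and appending two clamped slices per level; B makes one linear pass over the element positions 2..len, maintaining the current level's boundaries l, r and midpoint m and appending each element to the left or right output directly.
import Mathlib
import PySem

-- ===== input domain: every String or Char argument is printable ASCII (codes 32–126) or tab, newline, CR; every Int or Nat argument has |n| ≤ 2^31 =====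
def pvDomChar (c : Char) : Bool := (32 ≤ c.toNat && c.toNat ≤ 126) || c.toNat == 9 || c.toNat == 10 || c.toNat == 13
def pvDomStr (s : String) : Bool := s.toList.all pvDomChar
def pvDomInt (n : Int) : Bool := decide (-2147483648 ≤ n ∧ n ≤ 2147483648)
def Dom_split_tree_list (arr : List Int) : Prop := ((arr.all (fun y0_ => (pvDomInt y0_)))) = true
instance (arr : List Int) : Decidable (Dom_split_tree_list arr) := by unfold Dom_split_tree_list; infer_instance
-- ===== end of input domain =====

-- B replaces A's per-level slicing loop (quadratically many iterations) by one linear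
-- pass over element positions that maintains the current level's boundaries (objective: faster).

-- ===== PORT A =====
-- literal transliteration of A: for i in range(1, (len+1)**2) append the level-i
-- left/right slices.  `2 ** i` is ported as `2 ^ i.toNat`; exact because every i
-- produced by range(1, depth) is ≥ 1.
def split_tree_list (arr : List Int) : List Int × List Int :=
  let depth : Int := ((arr.length : Int) + 1) ^ 2
  (PySem.List.pyRange 1 depth 1).foldl
    (fun (st : List Int × List Int) (i : Int) =>
      let l : Int := (2 : Int) ^ i.toNat
      let r : Int := l * 2 - 1
      let m : Int := PySem.Int.floordiv (l + r) 2
      (st.1 ++ PySem.List.slice arr (some (l - 1)) (some m),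
       st.2 ++ PySem.List.slice arr (some m) (some r)))
    ([], [])

-- ===== PORT B =====
-- loop body of B (one iteration of `for p in range(2, len(arr)+1)`).
-- `arr[p - 1]` is ported with `pyGetD … 0`; exact because 2 ≤ p ≤ len(arr),
-- so the index p-1 is always in range and Python never raises here.
def pvStepB (arr : List Int) (st : Int × Int × Int × List Int × List Int) (p : Int) :
    Int × Int × Int × List Int × List Int :=
  match st with
  | (l, r, m, arrl, arrr) =>
    let (l, r, m) :=
      if p > r then
        let l := l * 2
        let r := 2 * l - 1
        let m := PySem.Int.floordiv (l + r) 2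
        (l, r, m)
      else (l, r, m)
    let x := PySem.List.pyGetD arr (p - 1) 0
    if p ≤ m then (l, r, m, arrl ++ [x], arrr) else (l, r, m, arrl, arrr ++ [x])

def split_tree_list_alt (arr : List Int) : List Int × List Int :=
  let fin :=
    (PySem.List.pyRange 2 ((arr.length : Int) + 1) 1).foldl (pvStepB arr) (2, 3, 2, [], [])
  (fin.2.2.2.1, fin.2.2.2.2)

-- ===== PRECONDITION & SPEC =====
def Spec_split_tree_list (arr : List Int) (out : List Int × List Int) : Prop := out = split_tree_list_alt arr
instance (arr : List Int) (out : List Int × List Int) : Decidable (Spec_split_tree_list arr out) := by unfold Spec_split_tree_list; infer_instance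

-- ===== CLAIM (what is proved, stated in full; the proofs are below) =====
def Claim_equal_split_tree_list : Prop := ∀ (arr : List Int), Dom_split_tree_list arr → Spec_split_tree_list arr (split_tree_list arr)

-- ===== LEMMAS AND PROOFS =====

-- the two slices A appends for (1-based) level j ≥ 1: positions 2^j .. 2^(j+1)-1,
-- split at the midpoint m_j = 3*2^(j-1) - 1.
def pvLsl (arr : List Int) (j : Nat) : List Int :=
  PySem.List.slice arr (some ((2:Int) ^ j - 1)) (some (3 * 2 ^ (j - 1) - 1))
def pvRsl (arr : List Int) (j : Nat) : List Int :=
  PySem.List.slice arr (some (3 * (2:Int) ^ (j - 1) - 1)) (some (2 ^ (j + 1) - 1))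

lemma pv_slice_nil_of_le (arr : List Int) (a b : Int) (h0 : 0 ≤ a) (h1 : 0 ≤ b) (h : b ≤ a) :
    PySem.List.slice arr (some a) (some b) = [] := by
  rw [PySem.List.slice_toNat arr h0 h1]
  have : b.toNat - a.toNat = 0 := by omega
  simp [this]

lemma pv_slice_nil_of_len_le (arr : List Int) (a b : Int) (h0 : 0 ≤ a) (h1 : 0 ≤ b)
    (h : (arr.length : Int) ≤ a) : PySem.List.slice arr (some a) (some b) = [] := by
  rw [PySem.List.slice_toNat arr h0 h1]
  have : arr.length ≤ a.toNat := by omega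
  simp [List.drop_eq_nil_of_le this]

lemma pv_slice_cons (arr : List Int) (a b : Int) (h0 : 0 ≤ a) (hab : a < b)
    (hlen : a < (arr.length : Int)) :
    PySem.List.slice arr (some a) (some b)
      = PySem.List.pyGetD arr a 0 :: PySem.List.slice arr (some (a + 1)) (some b) := by
  rw [PySem.List.slice_toNat arr h0 (by omega), PySem.List.slice_toNat arr (by omega) (by omega),
      PySem.List.pyGetD_eq_getElem arr 0 h0 hlen]
  have ha : a.toNat < arr.length := by omega
  rw [List.drop_eq_getElem_cons ha]
  have h2 : (a + 1).toNat = a.toNat + 1 := by omega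
  have h3 : b.toNat - a.toNat = (b.toNat - (a.toNat + 1)) + 1 := by omega
  rw [h2, h3, List.take_succ_cons]

lemma pv_levels_nil (arr : List Int) (s d : Nat) (h : (arr.length : Int) ≤ 2 ^ s - 1) :
    (List.range' s d).flatMap (pvLsl arr) = [] ∧ (List.range' s d).flatMap (pvRsl arr) = [] := by
  have hmono : ∀ j : Nat, s ≤ j → (2:Int) ^ s ≤ 2 ^ j := fun j hj =>
    pow_le_pow_right₀ (by norm_num) hj
  have h1 : ∀ j : Nat, 1 ≤ (2:Int) ^ j := fun j => one_le_pow₀ (by norm_num)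
  have hup : ∀ j : Nat, (2:Int) ^ j ≤ 3 * 2 ^ (j - 1) := by
    intro j
    rcases Nat.eq_zero_or_pos j with h0 | h0
    · subst h0; norm_num
    · have h2 : (2:Int) ^ j = 2 * 2 ^ (j - 1) := by
        conv_lhs => rw [show j = (j - 1) + 1 from by omega]
        rw [pow_succ]; ring
      have := h1 (j - 1); omega
  constructor <;> rw [List.flatMap_eq_nil_iff] <;> intro j hj <;>
    rw [List.mem_range'_1] at hj <;> obtain ⟨hj1, _⟩ := hj
  · exact pv_slice_nil_of_len_le _ _ _ (by have := h1 j; omega)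
      (by have := h1 (j - 1); omega) (by have := hmono j hj1; omega)
  · exact pv_slice_nil_of_len_le _ _ _ (by have := h1 (j - 1); omega)
      (by have := h1 (j + 1); omega)
      (by have := hmono j hj1; have := hup j; omega)

-- running B over the still-unprocessed positions p .. min r n of the CURRENT level
-- appends exactly the remainders of this level's two slices and leaves (l,r,m) alone.
lemma pv_inlevel (arr : List Int) : ∀ (c : Nat) (p l r m : Int) (al ar : List Int),
    1 ≤ p → 0 ≤ m → m ≤ r →
    p + (c : Int) = min r (arr.length : Int) + 1 →
    (PySem.List.pyRange p (min r (arr.length : Int) + 1) 1).foldl (pvStepB arr) (l, r, m, al, ar)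
      = (l, r, m, al ++ PySem.List.slice arr (some (p - 1)) (some m),
                  ar ++ PySem.List.slice arr (some (max (p - 1) m)) (some r)) := by
  intro c
  induction c with
  | zero =>
    intro p l r m al ar hp hm0 hmr hend
    rw [PySem.List.pyRange_one_eq_nil (by omega)]
    simp only [List.foldl_nil]
    rcases lt_or_ge (arr.length : Int) r with hc | hc
    · have hpm : p - 1 = (arr.length : Int) := by omega
      rw [hpm, pv_slice_nil_of_len_le arr _ m (Int.natCast_nonneg _) hm0 le_rfl,
          pv_slice_nil_of_len_le arr _ r (le_max_of_le_left (Int.natCast_nonneg _)) (by omega)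
            (le_max_left _ _)]
      simp
    · have hpm : p - 1 = r := by omega
      rw [hpm, pv_slice_nil_of_le arr r m (by omega) hm0 hmr,
          max_eq_left hmr, pv_slice_nil_of_le arr r r (by omega) (by omega) le_rfl]
      simp
  | succ c ih =>
    intro p l r m al ar hp hm0 hmr hend
    have hplt : p < min r (arr.length : Int) + 1 := by omega
    rw [PySem.List.pyRange_one_cons hplt, List.foldl_cons]
    have hnp : ¬ p > r := by omega
    by_cases hpm : p ≤ m
    · have hstep : pvStepB arr (l, r, m, al, ar) p
          = (l, r, m, al ++ [PySem.List.pyGetD arr (p - 1) 0], ar) := by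
        simp [pvStepB, hnp, hpm]
      rw [hstep, ih (p + 1) l r m _ _ (by omega) hm0 hmr (by omega)]
      have e1 : p + 1 - 1 = p := by ring
      rw [e1, pv_slice_cons arr (p - 1) m (by omega) (by omega) (by omega)]
      have e2 : p - 1 + 1 = p := by ring
      have hmx : max p m = max (p - 1) m := by omega
      rw [e2, hmx]
      simp
    · have hstep : pvStepB arr (l, r, m, al, ar) p
          = (l, r, m, al, ar ++ [PySem.List.pyGetD arr (p - 1) 0]) := by
        simp [pvStepB, hnp, hpm]
      rw [hstep, ih (p + 1) l r m _ _ (by omega) hm0 hmr (by omega)]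
      have e1 : p + 1 - 1 = p := by ring
      have hmax1 : max (p - 1) m = p - 1 := by omega
      have hmax2 : max p m = p := by omega
      rw [e1, hmax1, hmax2,
          pv_slice_cons arr (p - 1) r (by omega) (by omega) (by omega),
          pv_slice_nil_of_le arr (p - 1) m (by omega) hm0 (by omega),
          pv_slice_nil_of_le arr p m (by omega) hm0 (by omega)]
      have e2 : p - 1 + 1 = p := by ring
      rw [e2]
      simp

-- midpoint arithmetic of a level: (2^k + (2^k*2 - 1)) // 2 = 3*2^(k-1) - 1  for k ≥ 1.
lemma pv_mid (k : Nat) (hk : 1 ≤ k) :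
    PySem.Int.floordiv ((2:Int) ^ k + ((2:Int) ^ k * 2 - 1)) 2 = 3 * 2 ^ (k - 1) - 1 := by
  rw [PySem.Int.floordiv_eq_ediv_of_pos (by norm_num)]
  have hks : (2:Int) ^ k = 2 * 2 ^ (k - 1) := by
    conv_lhs => rw [show k = (k - 1) + 1 from by omega]
    rw [pow_succ]; ring
  omega

-- the glue: starting B at the first position of level k ≥ 1 with level-k boundaries,
-- the two output accumulators collect exactly A's per-level slices for levels k, k+1, …
lemma pv_glue (arr : List Int) : ∀ (d k : Nat) (al ar : List Int), 1 ≤ k →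
    (arr.length : Int) < 2 ^ (k + d) →
    ((PySem.List.pyRange ((2:Int) ^ k) ((arr.length : Int) + 1) 1).foldl (pvStepB arr)
        ((2:Int) ^ k, (2:Int) ^ k * 2 - 1, 3 * 2 ^ (k - 1) - 1, al, ar)).2.2.2
      = (al ++ (List.range' k d).flatMap (pvLsl arr),
         ar ++ (List.range' k d).flatMap (pvRsl arr)) := by
  intro d
  induction d with
  | zero =>
    intro k al ar hk hlt
    have hlt' : (arr.length : Int) < 2 ^ k := by simpa using hlt
    rw [PySem.List.pyRange_one_eq_nil (by omega)]
    simp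
  | succ d ih =>
    intro k al ar hk hlt
    have h1 : ∀ j : Nat, (1:Int) ≤ (2:Int) ^ j := fun j => one_le_pow₀ (by norm_num)
    have hkk : (2:Int) ^ k = 2 * 2 ^ (k - 1) := by
      conv_lhs => rw [show k = (k - 1) + 1 from by omega]
      rw [pow_succ]; ring
    rcases lt_or_ge (arr.length : Int) ((2:Int) ^ k) with hsmall | hbig
    · -- no positions left at all: every remaining level contributes nothing
      rw [PySem.List.pyRange_one_eq_nil (by omega)]
      obtain ⟨hL, hR⟩ := pv_levels_nil arr k (d + 1) (by omega)
      simp [hL, hR]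
    · -- at least one position of level k exists
      have hm0 : (0:Int) ≤ 3 * 2 ^ (k - 1) - 1 := by have := h1 (k - 1); omega
      have hmr : 3 * (2:Int) ^ (k - 1) - 1 ≤ (2:Int) ^ k * 2 - 1 := by
        have := h1 (k - 1); omega
      have hsplit : PySem.List.pyRange ((2:Int) ^ k) ((arr.length : Int) + 1) 1
          = PySem.List.pyRange ((2:Int) ^ k) (min ((2:Int) ^ k * 2 - 1) (arr.length : Int) + 1) 1
            ++ PySem.List.pyRange (min ((2:Int) ^ k * 2 - 1) (arr.length : Int) + 1)
                ((arr.length : Int) + 1) 1 := by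
        rw [← PySem.List.pyRange_one_append] <;> have := h1 (k - 1) <;> omega
      rw [hsplit, List.foldl_append,
          pv_inlevel arr (min ((2:Int) ^ k * 2 - 1) (arr.length : Int) + 1 - (2:Int) ^ k).toNat
            ((2:Int) ^ k) _ _ _ al ar (by have := h1 k; omega) hm0 hmr
            (by have := h1 (k - 1); omega)]
      have hmaxlm : max ((2:Int) ^ k - 1) (3 * (2:Int) ^ (k - 1) - 1)
          = 3 * (2:Int) ^ (k - 1) - 1 := by have := h1 (k - 1); omega
      rw [hmaxlm]
      have hLk : PySem.List.slice arr (some ((2:Int) ^ k - 1)) (some (3 * 2 ^ (k - 1) - 1))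
          = pvLsl arr k := rfl
      have hRk : PySem.List.slice arr (some (3 * (2:Int) ^ (k - 1) - 1)) (some ((2:Int) ^ k * 2 - 1))
          = pvRsl arr k := by
        have hp : (2:Int) ^ k * 2 - 1 = (2:Int) ^ (k + 1) - 1 := by rw [pow_succ]
        rw [hp]; rfl
      rw [hLk, hRk]
      rcases lt_or_ge ((2:Int) ^ k * 2 - 1) (arr.length : Int) with hc | hc
      · -- positions of level k+1 remain: its first position advances the boundaries
        have hminn : min ((2:Int) ^ k * 2 - 1) (arr.length : Int) = (2:Int) ^ k * 2 - 1 := by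
          omega
        rw [hminn]
        have hp1 : (2:Int) ^ (k + 1) = (2:Int) ^ k * 2 := by rw [pow_succ]
        have hcons : PySem.List.pyRange ((2:Int) ^ k * 2 - 1 + 1) ((arr.length : Int) + 1) 1
            = ((2:Int) ^ k * 2)
              :: PySem.List.pyRange ((2:Int) ^ k * 2 + 1) ((arr.length : Int) + 1) 1 := by
          have he : (2:Int) ^ k * 2 - 1 + 1 = (2:Int) ^ k * 2 := by ring
          rw [he, PySem.List.pyRange_one_cons (by omega)]
        -- evaluate the advancing step from the level-k state and from the level-(k+1) state
        have hdiv : ((2:Int) ^ k * 2 + (2 * ((2:Int) ^ k * 2) - 1)) / 2 = 3 * 2 ^ k - 1 := by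
          omega
        have hple : (2:Int) ^ k * 2 ≤ 3 * 2 ^ k - 1 := by have := h1 k; omega
        have hstep1 : pvStepB arr ((2:Int) ^ k, (2:Int) ^ k * 2 - 1, 3 * 2 ^ (k - 1) - 1,
              al ++ pvLsl arr k, ar ++ pvRsl arr k) ((2:Int) ^ k * 2)
            = ((2:Int) ^ k * 2, 2 * ((2:Int) ^ k * 2) - 1, 3 * 2 ^ k - 1,
               (al ++ pvLsl arr k) ++ [PySem.List.pyGetD arr ((2:Int) ^ k * 2 - 1) 0],
               ar ++ pvRsl arr k) := by
          have hgt : (2:Int) ^ k * 2 > (2:Int) ^ k * 2 - 1 := by omega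
          simp [pvStepB, hgt, hdiv, hple, List.append_assoc]
        have hstep2 : pvStepB arr ((2:Int) ^ (k + 1), (2:Int) ^ (k + 1) * 2 - 1,
              3 * 2 ^ ((k + 1) - 1) - 1, al ++ pvLsl arr k, ar ++ pvRsl arr k)
              ((2:Int) ^ k * 2)
            = ((2:Int) ^ k * 2, 2 * ((2:Int) ^ k * 2) - 1, 3 * 2 ^ k - 1,
               (al ++ pvLsl arr k) ++ [PySem.List.pyGetD arr ((2:Int) ^ k * 2 - 1) 0],
               ar ++ pvRsl arr k) := by
          have hcomm : (2:Int) ^ k * 2 * 2 = 2 * ((2:Int) ^ k * 2) := by ring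
          have hsm : ((k + 1) - 1 : Nat) = k := by omega
          rw [hsm]
          simp [pvStepB, hp1, hple, hcomm, List.append_assoc]
        have hrw : PySem.List.pyRange ((2:Int) ^ (k + 1)) ((arr.length : Int) + 1) 1
            = ((2:Int) ^ k * 2)
              :: PySem.List.pyRange ((2:Int) ^ k * 2 + 1) ((arr.length : Int) + 1) 1 := by
          rw [hp1]; exact PySem.List.pyRange_one_cons (by omega)
        rw [hcons, List.foldl_cons, hstep1, ← hstep2, ← List.foldl_cons, ← hrw,
            ih (k + 1) (al ++ pvLsl arr k) (ar ++ pvRsl arr k) (by omega)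
              (by have hke : k + 1 + d = k + (d + 1) := by omega
                  rw [hke]; exact hlt)]
        rw [List.range'_succ]
        simp
      · -- level k reaches the end of the array: no further positions, later levels are empty
        have hminn : min ((2:Int) ^ k * 2 - 1) (arr.length : Int) = (arr.length : Int) := by omega
        rw [hminn, PySem.List.pyRange_one_eq_nil (by omega)]
        obtain ⟨hL, hR⟩ := pv_levels_nil arr (k + 1) d (by rw [pow_succ]; omega)
        rw [List.range'_succ]
        simp [hL, hR]

-- A's fold, characterised: it concatenates the per-level slices of all levels 1 .. depth-1.
lemma pv_A_char (arr : List Int) :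
    split_tree_list arr
      = ((List.range' 1 ((((arr.length : Int) + 1) ^ 2 - 1).toNat)).flatMap (pvLsl arr),
         (List.range' 1 ((((arr.length : Int) + 1) ^ 2 - 1).toNat)).flatMap (pvRsl arr)) := by
  unfold split_tree_list
  simp only []
  rw [PySem.List.foldl_prod_mk
      (f := fun (acc : List Int) (i : Int) => acc ++ PySem.List.slice arr
        (some ((2:Int) ^ i.toNat - 1))
        (some (PySem.Int.floordiv ((2:Int) ^ i.toNat + ((2:Int) ^ i.toNat * 2 - 1)) 2)))
      (g := fun (acc : List Int) (i : Int) => acc ++ PySem.List.slice arr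
        (some (PySem.Int.floordiv ((2:Int) ^ i.toNat + ((2:Int) ^ i.toNat * 2 - 1)) 2))
        (some ((2:Int) ^ i.toNat * 2 - 1))),
      PySem.List.foldl_append_eq_flatMap, PySem.List.foldl_append_eq_flatMap,
      List.nil_append, List.nil_append,
      PySem.List.pyRange_one, List.range'_eq_map_range, List.flatMap_map, List.flatMap_map,
      List.flatMap_map, List.flatMap_map]
  have htn : ∀ k : Nat, ((1:Int) + (k : Int)).toNat = k + 1 := by intro k; omega
  have hmid : ∀ k : Nat,
      PySem.Int.floordiv ((2:Int) ^ (k + 1) + ((2:Int) ^ (k + 1) * 2 - 1)) 2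
        = 3 * 2 ^ k - 1 := by
    intro k
    have hm := pv_mid (k + 1) (by omega)
    rwa [Nat.add_sub_cancel] at hm
  rw [Prod.mk.injEq]
  constructor
  · refine congrArg (fun g => List.flatMap g _) (funext fun k => ?_)
    rw [htn k]
    show PySem.List.slice arr (some ((2:Int) ^ (k + 1) - 1))
        (some (PySem.Int.floordiv ((2:Int) ^ (k + 1) + ((2:Int) ^ (k + 1) * 2 - 1)) 2))
      = pvLsl arr (1 + k)
    rw [hmid k]
    have h1k : 1 + k = k + 1 := by omega
    rw [h1k]
    unfold pvLsl
    rw [Nat.add_sub_cancel]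
  · refine congrArg (fun g => List.flatMap g _) (funext fun k => ?_)
    rw [htn k]
    show PySem.List.slice arr
        (some (PySem.Int.floordiv ((2:Int) ^ (k + 1) + ((2:Int) ^ (k + 1) * 2 - 1)) 2))
        (some ((2:Int) ^ (k + 1) * 2 - 1))
      = pvRsl arr (1 + k)
    rw [hmid k]
    have h1k : 1 + k = k + 1 := by omega
    rw [h1k]
    unfold pvRsl
    rw [Nat.add_sub_cancel, pow_succ ((2:Int)) (k + 1)]

theorem pv_final (arr : List Int) : split_tree_list arr = split_tree_list_alt arr := by
  have hn2 : (arr.length : Int) < 2 ^ (1 + arr.length) := by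
    have h1 : (arr.length : Nat) < 2 ^ arr.length := Nat.lt_two_pow_self
    have h2 : (2:Nat) ^ arr.length ≤ 2 ^ (1 + arr.length) :=
      Nat.pow_le_pow_right (by norm_num) (by omega)
    exact_mod_cast lt_of_lt_of_le h1 h2
  have hglue := pv_glue arr arr.length 1 [] [] le_rfl hn2
  norm_num at hglue
  unfold split_tree_list_alt
  simp only []
  rw [hglue]
  -- truncate A's level range (n+1)^2-1 down to n: levels beyond n are empty
  have hsq : ((arr.length : Int) + 1) ^ 2 = (arr.length : Int) ^ 2 + 2 * (arr.length : Int) + 1 := by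
    ring
  have hsqn : (0:Int) ≤ (arr.length : Int) ^ 2 := sq_nonneg _
  have hnD : arr.length ≤ ((((arr.length : Int) + 1) ^ 2 - 1 : Int)).toNat := by omega
  have hDsplit : List.range' 1 ((((arr.length : Int) + 1) ^ 2 - 1 : Int)).toNat
      = List.range' 1 arr.length
        ++ List.range' (1 + arr.length)
            (((((arr.length : Int) + 1) ^ 2 - 1 : Int)).toNat - arr.length) := by
    have := List.range'_append (s := 1) (m := arr.length)
      (n := ((((arr.length : Int) + 1) ^ 2 - 1 : Int)).toNat - arr.length) (step := 1)
    rw [one_mul] at this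
    rw [this]
    congr 1
    omega
  have hbeyond : (arr.length : Int) ≤ 2 ^ (1 + arr.length) - 1 := by omega
  obtain ⟨hL, hR⟩ := pv_levels_nil arr (1 + arr.length)
    (((((arr.length : Int) + 1) ^ 2 - 1 : Int)).toNat - arr.length) hbeyond
  rw [pv_A_char, hDsplit, List.flatMap_append, List.flatMap_append, hL, hR,
      List.append_nil, List.append_nil]

-- ===== VERDICT (by name: the statement is the Claim_ definition above) =====
theorem split_tree_list_spec : Claim_equal_split_tree_list := by
  intro arr _
  unfold Spec_split_tree_list
  exact pv_final arr
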